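-- pv_equiv track=rewrite | github.com/danhdo533/Ai- | rag_core.py | split_csv_by_lines
-- ===== SOURCE A (Python) =====
-- from typing import List, Tuple
--
-- def split_csv_by_lines(csv_text: str, lines_per_chunk=100, max_chunks=1500) -> List[str]:
--     lines = csv_text.splitlines()
--     if not lines:
--         return []
--     header, rows = lines[0], lines[1:]
--     chunks = []
--     for i in range(0, len(rows), lines_per_chunk):
--         if len(chunks) >= max_chunks: break
--         block_lines = [header] + rows[i:i+lines_per_chunk]
--         block = "\n".join(block_lines).strip()
--         if block: chunks.append(block)
--     return chunks
-- ===== SOURCE B (Python) =====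
-- def split_csv_by_lines(csv_text: str, lines_per_chunk=100, max_chunks=1500):
--     lines = csv_text.splitlines()
--     if not lines:
--         return []
--     header, rows = lines[0], lines[1:]
--
--     def flush(chunks, buf):
--         block = "\n".join([header] + buf).strip()
--         if block and len(chunks) < max_chunks:
--             return chunks + [block]
--         return chunks
--
--     chunks = []
--     buf = []
--     for row in rows:
--         buf = buf + [row]
--         if len(buf) == lines_per_chunk:
--             chunks = flush(chunks, buf)
--             buf = []
--     if buf:
--         chunks = flush(chunks, buf)
--     return chunks
-- ===== Notes on version B (the rewrite author's own statement) =====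
-- stated objective: alternative
-- what changed: Replaced A's index-range loop with slicing (range(0,len(rows),k) plus rows[i:i+k]) by a single streaming pass over the rows that accumulates a buffer and flushes a header-prefixed block each time the buffer fills and once at the end.
-- outside the precondition, e.g. on split_csv_by_lines('h\nr1\nr2', -2, 5): A returns [], B returns ['h\nr1\nr2']; on split_csv_by_lines('', 0, 5): A returns [], B returns []
import Mathlib
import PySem

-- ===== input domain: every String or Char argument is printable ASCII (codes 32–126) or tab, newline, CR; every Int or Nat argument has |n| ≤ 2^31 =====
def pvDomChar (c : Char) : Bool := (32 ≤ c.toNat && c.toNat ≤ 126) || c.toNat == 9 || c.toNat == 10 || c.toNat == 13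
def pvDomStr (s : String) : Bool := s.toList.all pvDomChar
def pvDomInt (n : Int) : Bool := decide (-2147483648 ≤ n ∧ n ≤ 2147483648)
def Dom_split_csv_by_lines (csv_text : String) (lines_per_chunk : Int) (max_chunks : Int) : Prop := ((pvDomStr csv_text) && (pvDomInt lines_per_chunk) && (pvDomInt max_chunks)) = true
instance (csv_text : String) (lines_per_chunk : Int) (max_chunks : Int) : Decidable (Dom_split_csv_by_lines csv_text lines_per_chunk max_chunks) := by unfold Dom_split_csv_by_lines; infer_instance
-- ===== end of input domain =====

-- B replaces A's index-range-and-slice loop by a single streaming pass with a row buffer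
-- flushed each time it fills (alternative decomposition, same cost); return values proved equal.


-- ===== PORT A =====
-- for i in range(0, len(rows), lines_per_chunk): with break on max_chunks
def pvA_loop (header : String) (rows : List String) (lpc maxc : Int) :
    List Int → List String → List String
  | [], chunks => chunks
  | i :: is, chunks =>
    if maxc ≤ (chunks.length : Int) then chunks
    else
      let block := PySem.Str.strip (PySem.Str.join "\n"
        (header :: PySem.List.slice rows (some i) (some (i + lpc))))
      if block ≠ "" then pvA_loop header rows lpc maxc is (chunks ++ [block])
      else pvA_loop header rows lpc maxc is chunks

def split_csv_by_lines (csv_text : String) (lines_per_chunk : Int) (max_chunks : Int) : List String :=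
  match PySem.Str.splitlines csv_text with
  | [] => []
  | header :: rows =>
      pvA_loop header rows lines_per_chunk max_chunks
        (PySem.List.pyRange 0 (rows.length : Int) lines_per_chunk) []

-- ===== PORT B =====
def pvB_flush (header : String) (maxc : Int) (chunks buf : List String) : List String :=
  let block := PySem.Str.strip (PySem.Str.join "\n" (header :: buf))
  if block ≠ "" ∧ (chunks.length : Int) < maxc then chunks ++ [block] else chunks

def pvB_loop (header : String) (lpc maxc : Int) :
    List String → List String → List String → List String
  | [], buf, chunks => if buf ≠ [] then pvB_flush header maxc chunks buf else chunks
  | r :: rs, buf, chunks =>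
    let buf' := buf ++ [r]
    if (buf'.length : Int) = lpc then
      pvB_loop header lpc maxc rs [] (pvB_flush header maxc chunks buf')
    else pvB_loop header lpc maxc rs buf' chunks

def split_csv_by_lines_alt (csv_text : String) (lines_per_chunk : Int) (max_chunks : Int) : List String :=
  match PySem.Str.splitlines csv_text with
  | [] => []
  | header :: rows => pvB_loop header lines_per_chunk max_chunks rows [] []

-- ===== PRECONDITION & SPEC =====
-- Pre_ excludes lines_per_chunk ≤ 0: on 0 (with non-empty text) A raises ValueError from
-- range(..., 0); on a negative chunk size A's empty range accidentally yields [] while B's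
-- streaming pass yields one chunk — a degenerate corner no caller would specify.
def Pre_split_csv_by_lines (csv_text : String) (lines_per_chunk : Int) (max_chunks : Int) : Prop :=
  1 ≤ lines_per_chunk
instance (csv_text : String) (lines_per_chunk : Int) (max_chunks : Int) : Decidable (Pre_split_csv_by_lines csv_text lines_per_chunk max_chunks) := by unfold Pre_split_csv_by_lines; infer_instance

def pvWitness_split_csv_by_lines : String × Int × Int := ("id,name\n1,a\n2,b\n3,c", 2, 3)

def Spec_split_csv_by_lines (csv_text : String) (lines_per_chunk : Int) (max_chunks : Int) (out : List String) : Prop := out = split_csv_by_lines_alt csv_text lines_per_chunk max_chunks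
instance (csv_text : String) (lines_per_chunk : Int) (max_chunks : Int) (out : List String) : Decidable (Spec_split_csv_by_lines csv_text lines_per_chunk max_chunks out) := by unfold Spec_split_csv_by_lines; infer_instance

-- ===== CLAIM (what is proved, stated in full; the proofs are below) =====
def Claim_equal_split_csv_by_lines : Prop := ∀ (csv_text : String) (lines_per_chunk : Int) (max_chunks : Int), Dom_split_csv_by_lines csv_text lines_per_chunk max_chunks → Pre_split_csv_by_lines csv_text lines_per_chunk max_chunks → Spec_split_csv_by_lines csv_text lines_per_chunk max_chunks (split_csv_by_lines csv_text lines_per_chunk max_chunks)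

-- ===== LEMMAS AND PROOFS =====

-- cons form of pyRange for a general positive step
lemma pyRange_pos_cons (a b s : Int) (hs : 0 < s) (h : a < b) :
    PySem.List.pyRange a b s = a :: PySem.List.pyRange (a + s) b s := by
  rw [PySem.List.pyRange_of_pos a b hs, PySem.List.pyRange_of_pos (a+s) b hs]
  have key : (if a < b then ((b - a + s - 1) / s).toNat else 0)
      = (if a + s < b then ((b - (a+s) + s - 1) / s).toNat else 0) + 1 := by
    rw [if_pos h]
    by_cases h2 : a + s < b
    · rw [if_pos h2]
      have e1 : b - a + s - 1 = (b - (a+s) + s - 1) + 1 * s := by ring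
      rw [e1, Int.add_mul_ediv_right _ _ (by omega)]
      have : 0 ≤ (b - (a+s) + s - 1) / s := Int.ediv_nonneg (by omega) (by omega)
      omega
    · rw [if_neg h2]
      have h3 : b - a + s - 1 = (b - a - 1) + 1 * s := by ring
      rw [h3, Int.add_mul_ediv_right _ _ (by omega)]
      have h4 : (b - a - 1) / s = 0 := by
        apply Int.ediv_eq_zero_of_lt (by omega) (by omega)
      omega
  rw [key, List.range_succ_eq_map, List.map_cons, List.map_map]
  congr 1
  · simp
  · apply List.map_congr_left; intro k _; simp [Nat.succ_eq_add_one]; ring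

-- empty pyRange for a general positive step
lemma pyRange_pos_nil (a b s : Int) (hs : 0 < s) (h : b ≤ a) :
    PySem.List.pyRange a b s = [] := by
  rw [PySem.List.pyRange_of_pos a b hs]
  simp [show ¬ a < b by omega]

-- translation of pyRange by the step
lemma pyRange_pos_shift (b s : Int) (hs : 0 < s) :
    PySem.List.pyRange s b s = (PySem.List.pyRange 0 (b - s) s).map (· + s) := by
  rw [PySem.List.pyRange_of_pos _ _ hs, PySem.List.pyRange_of_pos _ _ hs, List.map_map]
  have : (if s < b then ((b - s + s - 1) / s).toNat else 0)
      = (if 0 < b - s then ((b - s - 0 + s - 1) / s).toNat else 0) := by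
    by_cases h : s < b <;> simp [h]
  rw [this]
  apply List.map_congr_left; intro k _; simp; ring

lemma mem_pyRange_zero_nonneg (b s i : Int) (hs : 0 < s) (hi : i ∈ PySem.List.pyRange 0 b s) :
    0 ≤ i := by
  rw [PySem.List.pyRange_of_pos _ _ hs] at hi
  simp at hi
  obtain ⟨k, _, rfl⟩ := hi
  positivity

-- B's loop is inert once the chunk budget is full
lemma pvB_loop_sat (header : String) (lpc maxc : Int) (rows buf chunks : List String)
    (h : maxc ≤ (chunks.length : Int)) :
    pvB_loop header lpc maxc rows buf chunks = chunks := by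
  induction rows generalizing buf with
  | nil =>
    simp only [pvB_loop, pvB_flush]
    split
    · rw [if_neg (by push_neg; intro _; omega)]
    · rfl
  | cons r rs ih =>
    simp only [pvB_loop, pvB_flush]
    split
    · rw [if_neg (by push_neg; intro _; omega)]; exact ih _
    · exact ih _

-- A's loop over indices shifted by kn equals A's loop over the dropped row list
lemma pvA_loop_drop (header : String) (lpc maxc : Int) (hlpc : 1 ≤ lpc)
    (idxs : List Int) (rows : List String) (kn : Nat) (chunks : List String)
    (hnn : ∀ i ∈ idxs, 0 ≤ i) :
    pvA_loop header rows lpc maxc (idxs.map (· + (kn : Int))) chunks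
      = pvA_loop header (rows.drop kn) lpc maxc idxs chunks := by
  induction idxs generalizing chunks with
  | nil => rfl
  | cons i is ih =>
    have hi : 0 ≤ i := hnn i (by simp)
    have hslice : PySem.List.slice rows (some (i + kn)) (some (i + kn + lpc))
        = PySem.List.slice (rows.drop kn) (some i) (some (i + lpc)) := by
      rw [PySem.List.slice_toNat _ (by omega) (by omega),
          PySem.List.slice_toNat _ (by omega) (by omega), List.drop_drop,
          show (i + (kn:Int)).toNat = i.toNat + kn by omega,
          show (i + (kn:Int) + lpc).toNat = (i + lpc).toNat + kn by omega,
          show (i + lpc).toNat + kn - (i.toNat + kn) = (i + lpc).toNat - i.toNat by omega,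
          Nat.add_comm i.toNat kn]
    simp only [pvA_loop, List.map_cons, hslice]
    split
    · rfl
    · split
      · exact ih _ (fun j hj => hnn j (by simp [hj]))
      · exact ih _ (fun j hj => hnn j (by simp [hj]))

-- B consumes its next k rows: it either ends (flushing the remainder) or flushes a full
-- buffer and restarts with an empty one
lemma pvB_fill (header : String) (lpc maxc : Int) :
    ∀ (rows : List String) (k : Nat) (buf chunks : List String), 1 ≤ k →
    (buf.length : Int) + k = lpc →
    pvB_loop header lpc maxc rows buf chunks =
      if rows.length < k then
        (if buf ++ rows = [] then chunks else pvB_flush header maxc chunks (buf ++ rows))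
      else pvB_loop header lpc maxc (rows.drop k) [] (pvB_flush header maxc chunks (buf ++ rows.take k)) := by
  intro rows
  induction rows with
  | nil =>
    intro k buf chunks hk _
    rw [if_pos (by simpa using hk)]
    simp only [pvB_loop, List.append_nil]
    by_cases hb : buf = [] <;> simp [hb]
  | cons r rs ih =>
    intro k buf chunks hk hlen
    simp only [pvB_loop]
    by_cases hk1 : k = 1
    · subst hk1
      rw [if_pos (by simp at hlen ⊢; omega)]
      rw [if_neg (by simp)]
      simp
    · obtain ⟨j, rfl⟩ : ∃ j, k = j + 1 := ⟨k - 1, by omega⟩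
      have hj : 1 ≤ j := by omega
      rw [if_neg (by simp at hlen ⊢; omega)]
      rw [ih j (buf ++ [r]) chunks hj (by simp at hlen ⊢; omega)]
      simp only [List.length_cons, List.drop_succ_cons, List.take_succ_cons,
        Nat.add_lt_add_iff_right, ← List.append_cons]

-- main correspondence: A's range-and-slice loop = B's streaming loop, from an empty buffer
lemma pvMain (header : String) (lpc maxc : Int) (hlpc : 1 ≤ lpc) :
    ∀ (n : Nat) (rows : List String) (chunks : List String), rows.length ≤ n →
    pvA_loop header rows lpc maxc (PySem.List.pyRange 0 (rows.length : Int) lpc) chunks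
      = pvB_loop header lpc maxc rows [] chunks := by
  intro n
  induction n with
  | zero =>
    intro rows chunks hn
    have : rows = [] := List.eq_nil_of_length_eq_zero (by omega)
    subst this
    simp only [List.length_nil, Nat.cast_zero]
    rw [pyRange_pos_nil 0 0 lpc (by omega) le_rfl]
    simp [pvA_loop, pvB_loop]
  | succ n ih =>
    intro rows chunks hn
    cases rows with
    | nil =>
      simp only [List.length_nil, Nat.cast_zero]
      rw [pyRange_pos_nil 0 0 lpc (by omega) le_rfl]
      simp [pvA_loop, pvB_loop]
    | cons r rs =>
      have hlen0 : (0:Int) < ((r :: rs).length : Int) := by simp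
      rw [pyRange_pos_cons 0 _ lpc (by omega) hlen0, zero_add]
      have hcast : ((lpc.toNat : Int)) = lpc := Int.toNat_of_nonneg (by omega)
      have hsl : PySem.List.slice (r :: rs) (some 0) (some (0 + lpc))
          = (r :: rs).take lpc.toNat := by
        rw [zero_add, PySem.List.slice_zero_start, PySem.List.slice_to _ (by omega)]
      have hshift : ∀ chunks' : List String,
          pvA_loop header (r :: rs) lpc maxc (PySem.List.pyRange lpc ((r :: rs).length : Int) lpc) chunks'
            = pvA_loop header ((r :: rs).drop lpc.toNat) lpc maxc
                (PySem.List.pyRange 0 (((r :: rs).length : Int) - lpc) lpc) chunks' := by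
        intro chunks'
        rw [pyRange_pos_shift _ lpc (by omega)]
        have hstep := pvA_loop_drop header lpc maxc hlpc
          (PySem.List.pyRange 0 (((r :: rs).length : Int) - lpc) lpc) (r :: rs) lpc.toNat chunks'
          (fun i hi => mem_pyRange_zero_nonneg _ _ i (by omega) hi)
        rw [hcast] at hstep
        exact hstep
      simp only [pvA_loop, hsl]
      by_cases hm : maxc ≤ ((chunks.length : Nat) : Int)
      · rw [if_pos hm, pvB_loop_sat header lpc maxc _ _ _ hm]
      · rw [if_neg hm]
        rw [pvB_fill header lpc maxc (r :: rs) lpc.toNat [] chunks (by omega)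
              (by simpa using hcast)]
        by_cases hsmall : (r :: rs).length < lpc.toNat
        · have hnil : PySem.List.pyRange 0 (((r :: rs).length : Int) - lpc) lpc = [] :=
            pyRange_pos_nil _ _ _ (by omega) (by omega)
          have htake : (r :: rs).take lpc.toNat = r :: rs :=
            List.take_of_length_le (by omega)
          rw [if_pos hsmall]
          simp only [hshift, hnil, pvA_loop, List.nil_append, htake]
          rw [if_neg (show ¬(r :: rs = []) from by simp)]
          by_cases hB : PySem.Str.strip (PySem.Str.join "\n" (header :: (r :: rs))) = ""
          · simp [pvB_flush, hB]
          · simp [pvB_flush, hB, show ((chunks.length : Nat) : Int) < maxc from by omega]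
        · rw [if_neg hsmall]
          have hdl : (((r :: rs).drop lpc.toNat).length : Int) = ((r :: rs).length : Int) - lpc := by
            simp only [List.length_drop]; omega
          have hih : ∀ c' : List String,
              pvA_loop header ((r :: rs).drop lpc.toNat) lpc maxc
                (PySem.List.pyRange 0 ((((r :: rs).drop lpc.toNat).length : Int)) lpc) c'
                = pvB_loop header lpc maxc ((r :: rs).drop lpc.toNat) [] c' :=
            fun c' => ih ((r :: rs).drop lpc.toNat) c'
              (by simp only [List.length_drop, List.length_cons] at *; omega)
          have hflush : ∀ c', pvA_loop header (r :: rs) lpc maxc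
              (PySem.List.pyRange lpc ((r :: rs).length : Int) lpc) c'
                = pvB_loop header lpc maxc ((r :: rs).drop lpc.toNat) [] c' := by
            intro c'
            rw [hshift, ← hdl]
            exact hih c'
          simp only [hflush, List.nil_append]
          by_cases hB : PySem.Str.strip (PySem.Str.join "\n" (header :: (r :: rs).take lpc.toNat)) = ""
          · simp [pvB_flush, hB]
          · simp [pvB_flush, hB, show ((chunks.length : Nat) : Int) < maxc from by omega]

-- ===== VERDICT (by name: the statement is the Claim_ definition above) =====
theorem split_csv_by_lines_spec : Claim_equal_split_csv_by_lines := by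
  intro csv lpc maxc _ hpre
  unfold Spec_split_csv_by_lines split_csv_by_lines split_csv_by_lines_alt
  cases PySem.Str.splitlines csv with
  | nil => rfl
  | cons header rows => exact pvMain header lpc maxc hpre rows.length rows [] le_rfl
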